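-- pv_equiv track=rewrite | github.com/Ace1928/eidosian_forge | archive_forge/src/archive_forge/class_QuadtreeTiles.py | tms_to_quadkey
-- ===== SOURCE A (Python) =====
-- def tms_to_quadkey(tms, google=False):
--     quadKey = ''
--     x, y, z = tms
--     if not google:
--         y = 2 ** z - 1 - y
--     for i in range(z, 0, -1):
--         digit = 0
--         mask = 1 << i - 1
--         if x & mask != 0:
--             digit += 1
--         if y & mask != 0:
--             digit += 2
--         quadKey += str(digit)
--     return quadKey
-- ===== SOURCE B (Python) =====
-- def tms_to_quadkey(tms, google=False):
--     x, y, z = tms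
--     if z <= 0:
--         return ''
--     if not google:
--         y = 2 ** z - 1 - y
--     digits = []
--     for _ in range(z):
--         digits.append(str(2 * (y % 2) + (x % 2)))
--         x //= 2
--         y //= 2
--     return ''.join(reversed(digits))
-- ===== Notes on version B (the rewrite author's own statement) =====
-- stated objective: alternative
-- what changed: Instead of scanning bits MSB-first with per-iteration shift-and-mask tests (1 << i-1, x & mask), B extracts bits LSB-first by repeated floor-division and parity (x % 2, x //= 2), collects the digits in a list and builds the quadkey back-to-front with a final reverse-and-join.
import Mathlib
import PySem

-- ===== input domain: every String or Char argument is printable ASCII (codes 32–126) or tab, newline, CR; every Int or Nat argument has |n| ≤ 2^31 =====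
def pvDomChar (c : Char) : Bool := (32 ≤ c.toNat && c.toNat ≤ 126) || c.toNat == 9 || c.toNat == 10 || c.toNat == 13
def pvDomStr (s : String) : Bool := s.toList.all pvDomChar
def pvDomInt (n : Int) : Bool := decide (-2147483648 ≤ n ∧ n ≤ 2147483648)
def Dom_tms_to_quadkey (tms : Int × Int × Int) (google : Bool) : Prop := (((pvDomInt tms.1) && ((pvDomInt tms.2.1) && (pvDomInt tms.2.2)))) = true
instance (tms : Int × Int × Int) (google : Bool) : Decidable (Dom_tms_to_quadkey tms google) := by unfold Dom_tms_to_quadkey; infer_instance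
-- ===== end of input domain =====

-- B extracts the quadkey digits LSB-first by repeated floor-division/parity and builds the string
-- back-to-front, instead of A's MSB-first shift-and-mask scan; objective: alternative (same cost).


-- ===== PORT A =====
-- 'quadKey += str(digit)' is accumulated on List Char (exact).  'y = 2 ** z - 1 - y' is exact for
-- z ≥ 0; for z < 0 Python makes y a float that is never used (the loop is empty), so y's value
-- there cannot reach the result.  Every i in range(z, 0, -1) satisfies i ≥ 1, so (i - 1).toNat
-- is exactly Python's i - 1.
def tms_to_quadkey (tms : Int × Int × Int) (google : Bool) : String :=
  match tms with
  | (x, y, z) =>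
    let y : Int := if !google then 2 ^ z.toNat - 1 - y else y
    String.ofList ((PySem.List.pyRange z 0 (-1)).foldl (fun (quadKey : List Char) (i : Int) =>
      let mask : Int := (1 : Int) <<< (i - 1).toNat
      let digit : Int := (if PySem.Int.band x mask ≠ 0 then 1 else 0)
                       + (if PySem.Int.band y mask ≠ 0 then 2 else 0)
      quadKey ++ PySem.Int.toChars digit) [])

-- ===== PORT B =====
-- literal port of Source B: digits collected LSB-first (each as the List Char of str(...)), x and y
-- halved with Python floor division; ''.join(reversed(digits)) is reverse-then-flatten.
def tms_to_quadkey_alt (tms : Int × Int × Int) (google : Bool) : String :=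
  match tms with
  | (x, y, z) =>
    if z ≤ 0 then "" else
    let y : Int := if !google then 2 ^ z.toNat - 1 - y else y
    let st := (List.range z.toNat).foldl
      (fun (st : Int × Int × List (List Char)) (_ : Nat) =>
        (PySem.Int.floordiv st.1 2, PySem.Int.floordiv st.2.1 2,
         st.2.2 ++ [PySem.Int.toChars (2 * PySem.Int.mod st.2.1 2 + PySem.Int.mod st.1 2)]))
      (x, y, ([] : List (List Char)))
    String.ofList st.2.2.reverse.flatten

-- ===== PRECONDITION & SPEC =====
def Spec_tms_to_quadkey (tms : Int × Int × Int) (google : Bool) (out : String) : Prop := out = tms_to_quadkey_alt tms google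
instance (tms : Int × Int × Int) (google : Bool) (out : String) : Decidable (Spec_tms_to_quadkey tms google out) := by unfold Spec_tms_to_quadkey; infer_instance

-- ===== CLAIM (what is proved, stated in full; the proofs are below) =====
def Claim_equal_tms_to_quadkey : Prop := ∀ (tms : Int × Int × Int) (google : Bool), Dom_tms_to_quadkey tms google → Spec_tms_to_quadkey tms google (tms_to_quadkey tms google)

-- ===== LEMMAS AND PROOFS =====

-- the chars B produces for bit k of the pair (x, flipped y)
def pvDigChars (x y : Int) (k : Nat) : List Char :=
  PySem.Int.toChars (2 * PySem.Int.mod (PySem.Int.floordiv y ((2:Int)^k)) 2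
                       + PySem.Int.mod (PySem.Int.floordiv x ((2:Int)^k)) 2)

-- A's mask test for bit k, as a 0/1 value, equals B's divide-then-parity bit (all Int, incl. negatives)
lemma pv_bit01 (t : Int) (k : Nat) :
    (if PySem.Int.band t ((2:Int)^k) ≠ 0 then (1:Int) else 0)
      = PySem.Int.mod (PySem.Int.floordiv t ((2:Int)^k)) 2 := by
  have hq : (0:Int) < 2^k := by positivity
  have hcast : ((2:Int)^k) = ((2^k : Nat) : Int) := by push_cast; ring
  rw [PySem.Int.floordiv_eq_ediv_of_pos hq,
      PySem.Int.mod_eq_emod_of_pos (by norm_num : (0:Int) < 2)]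
  by_cases ht : 0 ≤ t
  · lift t to ℕ using ht with m
    have hband : PySem.Int.band (m : Int) ((2:Int)^k) = ((m &&& 2^k : Nat) : Int) := by
      rw [hcast]; exact PySem.Int.band_natCast m (2^k)
    have hdiv : ((m : Int) / (2:Int)^k) % 2 = ((m / 2^k % 2 : Nat) : Int) := by
      rw [hcast]; norm_cast
    have hand : m &&& 2^k = (m / 2^k % 2) * 2^k := by
      rw [Nat.and_two_pow, Nat.toNat_testBit]
    rw [hband, hdiv, hand]
    rcases Nat.mod_two_eq_zero_or_one (m / 2^k) with h | h
    · simp [h]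
    · simp [h]
  · -- t < 0 : Python's two's-complement view, t = -(m + 1)
    have hm0 : 0 ≤ -t - 1 := by omega
    set m : Nat := (-t - 1).toNat with hmdef
    have hmt : t = -((m : Int) + 1) := by omega
    -- the branch of band for a < 0 ≤ b
    have hband : PySem.Int.band t ((2:Int)^k) = ((2^k - (2^k &&& m) : Nat) : Int) := by
      rw [PySem.Int.band, if_neg (by omega), if_pos (le_of_lt hq)]
      congr 2
    -- Euclidean quotient of -(m + 1) by 2^k
    obtain ⟨s, r, hsr, hr⟩ : ∃ s r : Nat, m = 2^k * s + r ∧ r < 2^k :=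
      ⟨m / 2^k, m % 2^k, (Nat.div_add_mod m (2^k)).symm, Nat.mod_lt _ (by positivity)⟩
    have hs : m / 2^k = s := by
      rw [hsr, Nat.mul_add_div (by positivity), Nat.div_eq_of_lt hr, Nat.add_zero]
    have hediv : t / (2:Int)^k = -((s : Int) + 1) := by
      have hrep : t = ((2:Int)^k - 1 - r) + (2:Int)^k * (-((s : Int) + 1)) := by
        rw [hmt]; push_cast [hsr]; ring
      rw [hrep, Int.add_mul_ediv_left _ _ (ne_of_gt hq),
          Int.ediv_eq_zero_of_lt (by omega) (by omega), Int.zero_add]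
    have hand : 2^k &&& m = (m / 2^k % 2) * 2^k := by
      rw [Nat.land_comm, Nat.and_two_pow, Nat.toNat_testBit]
    rw [hband, hediv, hand, hs]
    rcases Nat.mod_two_eq_zero_or_one s with h | h
    · rw [h]
      have hne : ((2^k - 0 * 2^k : Nat) : Int) ≠ 0 := by
        simp
      rw [if_pos hne]
      omega
    · rw [h]
      rw [if_neg (by simp)]
      omega

-- A's two-mask digit for bit k, rendered by str(), is B's digit chars for bit k
lemma pv_digit_chars (x y : Int) (k : Nat) :
    PySem.Int.toChars ((if PySem.Int.band x ((1:Int) <<< k) ≠ 0 then 1 else 0)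
        + (if PySem.Int.band y ((1:Int) <<< k) ≠ 0 then 2 else 0))
      = pvDigChars x y k := by
  have hs : (1:Int) <<< k = 2^k := by rw [Int.shiftLeft_eq]; ring
  have h2 : (if PySem.Int.band y ((2:Int)^k) ≠ 0 then (2:Int) else 0)
      = 2 * (if PySem.Int.band y ((2:Int)^k) ≠ 0 then (1:Int) else 0) := by
    split_ifs <;> ring
  rw [pvDigChars, hs, h2, pv_bit01, pv_bit01]
  congr 1
  ring

-- state of B's loop after n iterations: both coordinates divided by 2^n, digits 0..n-1 appended
lemma pv_loopB (x y : Int) (n : Nat) (ds : List (List Char)) :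
    (List.range n).foldl
      (fun (st : Int × Int × List (List Char)) (_ : Nat) =>
        (PySem.Int.floordiv st.1 2, PySem.Int.floordiv st.2.1 2,
         st.2.2 ++ [PySem.Int.toChars (2 * PySem.Int.mod st.2.1 2 + PySem.Int.mod st.1 2)]))
      (x, y, ds)
    = (PySem.Int.floordiv x ((2:Int)^n), PySem.Int.floordiv y ((2:Int)^n),
       ds ++ (List.range n).map (pvDigChars x y)) := by
  have hdd (t : Int) (n : Nat) :
      PySem.Int.floordiv (PySem.Int.floordiv t ((2:Int)^n)) 2
        = PySem.Int.floordiv t ((2:Int)^(n+1)) := by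
    rw [PySem.Int.floordiv_eq_ediv_of_pos (by positivity : (0:Int) < 2^n),
        PySem.Int.floordiv_eq_ediv_of_pos (by norm_num : (0:Int) < 2),
        PySem.Int.floordiv_eq_ediv_of_pos (by positivity : (0:Int) < 2^(n+1)),
        Int.ediv_ediv_of_nonneg (by positivity), pow_succ]
  induction n with
  | zero =>
    simp
  | succ n ih =>
    rw [List.range_succ, List.foldl_append, ih]
    simp only [List.foldl_cons, List.foldl_nil, Prod.mk.injEq]
    refine ⟨hdd x n, hdd y n, ?_⟩
    simp [pvDigChars, List.map_append, List.append_assoc]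

-- the per-index match between A's MSB-first digit list and B's reversed LSB-first digit list
lemma pv_lists_eq (x y : Int) (n : Nat) :
    (List.range n).map (fun (k : Nat) =>
      PySem.Int.toChars ((if PySem.Int.band x ((1:Int) <<< (((n:Int) - (k:Int)) - 1).toNat) ≠ 0 then 1 else 0)
        + (if PySem.Int.band y ((1:Int) <<< (((n:Int) - (k:Int)) - 1).toNat) ≠ 0 then 2 else 0)))
      = ((List.range n).map (pvDigChars x y)).reverse := by
  apply List.ext_getElem
  · simp
  · intro i h1 h2
    simp only [List.getElem_map, List.getElem_range, List.getElem_reverse,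
      List.length_map, List.length_range]
    have ht : (((n:Int) - (i:Int)) - 1).toNat = n - 1 - i := by
      simp only [List.length_map, List.length_range] at h1
      omega
    rw [ht, pv_digit_chars]

-- ===== VERDICT (by name: the statement is the Claim_ definition above) =====
theorem tms_to_quadkey_spec : Claim_equal_tms_to_quadkey := by
  intro tms google _
  obtain ⟨x, y, z⟩ := tms
  unfold Spec_tms_to_quadkey
  by_cases hz : z ≤ 0
  · simp only [tms_to_quadkey, tms_to_quadkey_alt, if_pos hz,
      PySem.List.pyRange_neg_one_eq_nil hz]
    rfl
  · obtain ⟨n, rfl⟩ : ∃ n : ℕ, z = (n : Int) := ⟨z.toNat, by omega⟩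
    simp only [tms_to_quadkey, tms_to_quadkey_alt, if_neg hz, Int.toNat_natCast]
    rw [PySem.List.foldl_append_eq_flatMap, pv_loopB]
    simp only [List.nil_append, List.flatMap_def]
    rw [PySem.List.pyRange_neg_one]
    simp only [Int.sub_zero, Int.toNat_natCast, List.map_map, Function.comp_def]
    rw [pv_lists_eq]
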